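-- pv_equiv track=rewrite | github.com/trangyp/AMOS-Code | amos_translation_layer.py | _segment_clauses
-- ===== SOURCE A (Python) =====
-- from typing import Any, Dict, List, Optional, Tuple
--
-- def _segment_clauses(text: str) -> List[str]:
--     """Segment text into clauses."""
--     # Simplified clause segmentation
--     delimiters = [".", "!", "?", ";", ", and", ", but", ", so"]
--     clauses = [text]
--     for delim in delimiters:
--         new_clauses = []
--         for clause in clauses:
--             parts = clause.split(delim)
--             new_clauses.extend([p.strip() for p in parts if p.strip()])
--         clauses = new_clauses
--     return clauses if clauses else [text]
-- ===== SOURCE B (Python) =====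
-- from typing import List
--
-- def _segment_clauses(text: str) -> List[str]:
--     """Segment text into clauses (single left-to-right scan)."""
--     delimiters = (".", "!", "?", ";", ", and", ", but", ", so")
--     pieces = []
--     start = 0
--     i = 0
--     n = len(text)
--     while i < n:
--         for d in delimiters:
--             if text.startswith(d, i):
--                 pieces.append(text[start:i])
--                 i += len(d)
--                 start = i
--                 break
--         else:
--             i += 1
--     pieces.append(text[start:])
--     clauses = [p.strip() for p in pieces if p.strip()]
--     return clauses if clauses else [text]
-- ===== Notes on version B (the rewrite author's own statement) =====
-- stated objective: alternative
-- what changed: A re-splits the whole clause list once per delimiter (seven nested passes, stripping every piece in each pass); B makes a single left-to-right scan over the text, cutting at the first delimiter matching at each position, and strips/filters the pieces once at the end.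
import Mathlib
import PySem

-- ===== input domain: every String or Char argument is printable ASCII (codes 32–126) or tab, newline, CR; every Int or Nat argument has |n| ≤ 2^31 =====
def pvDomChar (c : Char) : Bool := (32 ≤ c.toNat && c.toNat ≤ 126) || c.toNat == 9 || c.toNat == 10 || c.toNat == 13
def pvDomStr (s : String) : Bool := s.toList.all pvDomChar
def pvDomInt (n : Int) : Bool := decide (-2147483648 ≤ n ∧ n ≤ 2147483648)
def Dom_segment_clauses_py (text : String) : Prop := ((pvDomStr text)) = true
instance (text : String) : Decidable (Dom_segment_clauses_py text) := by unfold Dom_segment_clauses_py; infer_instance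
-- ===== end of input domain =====

-- B replaces A's seven re-splitting passes (each rebuilding the whole clause list) by ONE
-- left-to-right scan that cuts at every delimiter occurrence, followed by a single strip/filter pass.

-- ===== PORT A =====
-- A: clauses = [text]; for each delimiter, re-split every clause, strip pieces, drop empty ones.
def segment_clauses_py (text : String) : List String :=
  let delimiters : List (List Char) :=
    [['.'], ['!'], ['?'], [';'],
     [',', ' ', 'a', 'n', 'd'], [',', ' ', 'b', 'u', 't'], [',', ' ', 's', 'o']]
  let clauses := delimiters.foldl
    (fun clauses delim =>
      clauses.foldl
        (fun newClauses clause =>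
          newClauses ++
            ((PySem.Chars.splitOn clause delim).map PySem.Chars.strip).filter
              (fun p => p ≠ []))
        [])
    [text.toList]
  if clauses ≠ [] then clauses.map String.ofList else [text]

-- ===== PORT B =====
def pvDelims : List (List Char) :=
  [['.'], ['!'], ['?'], [';'],
   [',', ' ', 'a', 'n', 'd'], [',', ' ', 'b', 'u', 't'], [',', ' ', 's', 'o']]

-- the while-loop of Source B: scan left to right, cut at the first delimiter matching here
def pvScanG (delims : List (List Char)) : List Char → List (List Char)
  | [] => [[]]
  | c :: rest =>
    match delims.find? (fun d => d.isPrefixOf (c :: rest)) with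
    | some d => [] :: pvScanG delims (List.drop (d.length - 1) rest)
    | none =>
      match pvScanG delims rest with
      | [] => [[c]]
      | p :: ps => (c :: p) :: ps
termination_by cs => cs.length
decreasing_by
  · simp only [List.length_drop, List.length_cons]; omega
  · simp

def segment_clauses_py_alt (text : String) : List String :=
  let pieces := pvScanG pvDelims text.toList
  let clauses := (pieces.map PySem.Chars.strip).filter (fun p => p ≠ [])
  if clauses ≠ [] then clauses.map String.ofList else [text]

-- ===== PRECONDITION & SPEC =====
def Spec_segment_clauses_py (text : String) (out : List String) : Prop := out = segment_clauses_py_alt text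
instance (text : String) (out : List String) : Decidable (Spec_segment_clauses_py text out) := by unfold Spec_segment_clauses_py; infer_instance

-- ===== CLAIM (what is proved, stated in full; the proofs are below) =====
def Claim_equal_segment_clauses_py : Prop := ∀ (text : String), Dom_segment_clauses_py text → Spec_segment_clauses_py text (segment_clauses_py text)

-- ===== LEMMAS AND PROOFS =====

def pvConsHead (c : Char) : List (List Char) → List (List Char)
  | [] => [[c]]
  | p :: ps => (c :: p) :: ps

def pvConsApp (a : List Char) : List (List Char) → List (List Char)
  | [] => [a]
  | p :: ps => (a ++ p) :: ps

def pvSplit (d : List Char) : List Char → List (List Char)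
  | [] => [[]]
  | c :: rest =>
    if d.isPrefixOf (c :: rest) then [] :: pvSplit d (List.drop (d.length - 1) rest)
    else pvConsHead c (pvSplit d rest)
termination_by cs => cs.length
decreasing_by
  · simp only [List.length_drop, List.length_cons]; omega
  · simp

theorem pvConsHead_ne_nil (c : Char) (ps : List (List Char)) : pvConsHead c ps ≠ [] := by
  cases ps <;> simp [pvConsHead]


theorem pvSplit_nil (d : List Char) : pvSplit d [] = [[]] := by rw [pvSplit.eq_def]

theorem pvSplit_cons_pos (d : List Char) (c : Char) (rest : List Char)
    (hp : d.isPrefixOf (c :: rest)) :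
    pvSplit d (c :: rest) = [] :: pvSplit d (List.drop (d.length - 1) rest) := by
  conv_lhs => rw [pvSplit.eq_def]
  simp [hp]

theorem pvSplit_cons_neg (d : List Char) (c : Char) (rest : List Char)
    (hp : ¬ d.isPrefixOf (c :: rest)) :
    pvSplit d (c :: rest) = pvConsHead c (pvSplit d rest) := by
  conv_lhs => rw [pvSplit.eq_def]
  simp [hp]

theorem pvSplit_ne_nil (d t) : pvSplit d t ≠ [] := by
  cases t with
  | nil => simp [pvSplit_nil]
  | cons c rest =>
    by_cases hp : d.isPrefixOf (c :: rest)
    · rw [pvSplit_cons_pos _ _ _ hp]; simp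
    · rw [pvSplit_cons_neg _ _ _ hp]; exact pvConsHead_ne_nil _ _

theorem drop_pred_eq (d : List Char) (hd : d ≠ []) (c : Char) (rest : List Char) :
    List.drop (d.length - 1) rest = List.drop d.length (c :: rest) := by
  cases d with
  | nil => exact absurd rfl hd
  | cons x xs => simp [List.drop_succ_cons]

theorem go_inv (sep : List Char) (hsep : 1 ≤ sep.length) :
    ∀ fuel l (cur : List Char) (acc : List (List Char)), l.length < fuel →
      PySem.Chars.splitOn.go sep fuel l cur acc
        = acc.reverse ++ pvConsApp cur.reverse (pvSplit sep l) := by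
  intro fuel
  induction fuel with
  | zero => intro l cur acc h; omega
  | succ f ih =>
    intro l cur acc h
    cases l with
    | nil =>
      unfold PySem.Chars.splitOn.go
      simp [pvSplit_nil, pvConsApp]
    | cons c rest =>
      unfold PySem.Chars.splitOn.go
      by_cases hp : sep.isPrefixOf (c :: rest)
      · simp only [hp, if_true]
        have hle : sep.length ≤ rest.length + 1 := by
          have := List.IsPrefix.length_le (List.isPrefixOf_iff_prefix.mp hp)
          simpa using this
        rw [ih _ _ _ (by simp only [List.length_drop, List.length_cons] at h ⊢; omega)]
        rw [pvSplit_cons_pos _ _ _ hp,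
            drop_pred_eq sep (by intro hn; rw [hn] at hsep; simp at hsep) c rest]
        cases hps : pvSplit sep (List.drop sep.length (c :: rest)) with
        | nil => exact absurd hps (pvSplit_ne_nil _ _)
        | cons p ps => simp [pvConsApp]
      · simp only [hp, Bool.false_eq_true, if_false]
        have hlt : rest.length < f := by simp at h; omega
        rw [ih _ (c :: cur) acc hlt]
        rw [pvSplit_cons_neg _ _ _ hp]
        cases hps : pvSplit sep rest with
        | nil => exact absurd hps (pvSplit_ne_nil _ _)
        | cons p ps => simp [pvConsApp, pvConsHead]

theorem splitOn_eq_pvSplit (sep : List Char) (hsep : sep ≠ []) (s : List Char) :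
    PySem.Chars.splitOn s sep = pvSplit sep s := by
  unfold PySem.Chars.splitOn
  rw [go_inv sep (by cases sep with
        | nil => exact absurd rfl hsep
        | cons x xs => simp) _ _ _ _ (by omega)]
  cases hps : pvSplit sep s with
  | nil => exact absurd hps (pvSplit_ne_nil _ _)
  | cons p ps => simp [pvConsApp]

-- ---------- generic helpers ----------
theorem pvConsApp_nil_of_ne (ps : List (List Char)) (h : ps ≠ []) : pvConsApp [] ps = ps := by
  cases ps with
  | nil => exact absurd rfl h
  | cons p t => simp [pvConsApp]

theorem pvConsHead_consApp (x : Char) (a : List Char) (ps : List (List Char)) :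
    pvConsHead x (pvConsApp a ps) = pvConsApp (x :: a) ps := by
  cases ps <;> simp [pvConsHead, pvConsApp]

def pvMapLast (b : List Char) : List (List Char) → List (List Char)
  | [] => []
  | [p] => [p ++ b]
  | p :: q :: ps => p :: pvMapLast b (q :: ps)

theorem pvMapLast_cons_of_ne (b : List Char) (p : List Char) (ps : List (List Char)) (h : ps ≠ []) :
    pvMapLast b (p :: ps) = p :: pvMapLast b ps := by
  cases ps with
  | nil => exact absurd rfl h
  | cons q t => simp [pvMapLast]

theorem pvConsHead_mapLast (c : Char) (b : List Char) (ps : List (List Char)) (h : ps ≠ []) :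
    pvConsHead c (pvMapLast b ps) = pvMapLast b (pvConsHead c ps) := by
  cases ps with
  | nil => exact absurd rfl h
  | cons p t =>
    cases t with
    | nil => simp [pvMapLast, pvConsHead]
    | cons q u => simp [pvMapLast, pvConsHead]

-- head piece of a split is a prefix of the input
theorem pvSplit_head_prefix (d : List Char) (t : List Char) (p : List Char) (ps : List (List Char))
    (h : pvSplit d t = p :: ps) : p <+: t := by
  induction t using pvSplit.induct d generalizing p ps with
  | case1 =>
    rw [pvSplit_nil] at h
    cases h; simp
  | case2 c rest hp ih =>
    rw [pvSplit_cons_pos _ _ _ hp] at h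
    cases h; simp
  | case3 c rest hp ih =>
    rw [pvSplit_cons_neg _ _ _ hp] at h
    cases hq : pvSplit d rest with
    | nil => exact absurd hq (pvSplit_ne_nil _ _)
    | cons q qs =>
      rw [hq] at h
      simp [pvConsHead] at h
      obtain ⟨h1, -⟩ := h
      subst h1
      exact List.cons_prefix_cons.mpr ⟨rfl, ih q qs hq⟩

-- no occurrence anywhere: split is the identity piece
theorem pvSplit_of_no_occ (d t : List Char) (h : ∀ j, ¬ d <+: List.drop j t) :
    pvSplit d t = [t] := by
  induction t with
  | nil => exact pvSplit_nil d
  | cons c rest ih =>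
    have h0 : ¬ d.isPrefixOf (c :: rest) := by
      rw [List.isPrefixOf_iff_prefix]
      simpa using h 0
    rw [pvSplit_cons_neg _ _ _ h0, ih (fun j => by simpa using h (j + 1))]
    simp [pvConsHead]

-- ---------- whitespace / strip lemmas ----------
theorem pv_lstrip_ws_append (a x : List Char) (ha : ∀ c ∈ a, PySem.Chars.isspace c = true) :
    PySem.Chars.lstrip (a ++ x) = PySem.Chars.lstrip x := by
  simp [PySem.Chars.lstrip, List.dropWhile_append, List.dropWhile_eq_nil_iff.mpr ha]

theorem pv_strip_ws_append_left (a x : List Char) (ha : ∀ c ∈ a, PySem.Chars.isspace c = true) :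
    PySem.Chars.strip (a ++ x) = PySem.Chars.strip x := by
  simp [PySem.Chars.strip, pv_lstrip_ws_append a x ha]

theorem pv_rstrip_ws_append (x b : List Char) (hb : ∀ c ∈ b, PySem.Chars.isspace c = true) :
    PySem.Chars.rstrip (x ++ b) = PySem.Chars.rstrip x := by
  have hbrev : List.dropWhile PySem.Chars.isspace b.reverse = [] :=
    (List.dropWhile_eq_nil_iff (l := b.reverse)).mpr (by intro c hc; exact hb c (by simpa using hc))
  unfold PySem.Chars.rstrip
  rw [List.reverse_append, List.dropWhile_append, hbrev]
  simp

theorem pv_lstrip_append_of_ne (x b : List Char) (hx : PySem.Chars.lstrip x ≠ []) :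
    PySem.Chars.lstrip (x ++ b) = PySem.Chars.lstrip x ++ b := by
  have hx' : List.dropWhile PySem.Chars.isspace x ≠ [] := hx
  rw [PySem.Chars.lstrip, List.dropWhile_append]
  simp [PySem.Chars.lstrip, hx']

theorem pv_strip_ws_append_right (x b : List Char) (hb : ∀ c ∈ b, PySem.Chars.isspace c = true) :
    PySem.Chars.strip (x ++ b) = PySem.Chars.strip x := by
  unfold PySem.Chars.strip
  by_cases hx : PySem.Chars.lstrip x = []
  · have hxws : ∀ c ∈ x, PySem.Chars.isspace c = true := by
      intro c hc
      by_contra hcc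
      have := List.dropWhile_eq_nil_iff.mp (by simpa [PySem.Chars.lstrip] using hx) c hc
      simp_all
    rw [pv_lstrip_ws_append x b hxws, hx]
    have : PySem.Chars.lstrip b = [] :=
      List.dropWhile_eq_nil_iff.mpr hb
    rw [this]
  · rw [pv_lstrip_append_of_ne x b hx, pv_rstrip_ws_append _ _ hb]

theorem pv_rstrip_decomp (m : List Char) :
    m = PySem.Chars.rstrip m ++ (List.takeWhile PySem.Chars.isspace m.reverse).reverse := by
  conv_lhs => rw [← m.reverse_reverse,
    ← List.takeWhile_append_dropWhile (p := PySem.Chars.isspace) (l := m.reverse)]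
  rw [List.reverse_append]
  rfl

theorem pv_strip_decomp (p : List Char) :
    ∃ a b, p = a ++ PySem.Chars.strip p ++ b
      ∧ (∀ c ∈ a, PySem.Chars.isspace c = true) ∧ (∀ c ∈ b, PySem.Chars.isspace c = true) := by
  refine ⟨List.takeWhile PySem.Chars.isspace p,
          (List.takeWhile PySem.Chars.isspace (PySem.Chars.lstrip p).reverse).reverse, ?_, ?_, ?_⟩
  · conv_lhs => rw [← List.takeWhile_append_dropWhile (p := PySem.Chars.isspace) (l := p)]
    rw [List.append_assoc]
    congr 1
    conv_lhs => rw [show List.dropWhile PySem.Chars.isspace p = PySem.Chars.lstrip p from rfl,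
      pv_rstrip_decomp (PySem.Chars.lstrip p)]
    rfl
  · intro c hc; exact List.mem_takeWhile_imp hc
  · intro c hc
    exact List.mem_takeWhile_imp (by simpa using hc)

theorem pv_strip_eq_nil_iff (p : List Char) :
    PySem.Chars.strip p = [] ↔ ∀ c ∈ p, PySem.Chars.isspace c = true := by
  constructor
  · intro h c hc
    obtain ⟨a, b, hd, ha, hb⟩ := pv_strip_decomp p
    rw [h] at hd
    rw [hd] at hc
    simp at hc
    rcases hc with hc | hc
    · exact ha c hc
    · exact hb c hc
  · intro h
    unfold PySem.Chars.strip
    rw [show PySem.Chars.lstrip p = [] from List.dropWhile_eq_nil_iff.mpr h]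
    rfl

-- ---------- no-occurrence derivations from whitespace ----------
theorem pv_no_prefix_ws (d w : List Char) (hd : d ≠ [])
    (hh : PySem.Chars.isspace (d.getD 0 'x') = false)
    (hw : ∀ c ∈ w, PySem.Chars.isspace c = true) (j : Nat) : ¬ d <+: List.drop j w := by
  intro hpre
  cases d with
  | nil => exact hd rfl
  | cons xc dtl =>
    cases hdj : List.drop j w with
    | nil =>
      rw [hdj] at hpre
      simp at hpre
    | cons y ys =>
      rw [hdj] at hpre
      obtain ⟨hxy, -⟩ := List.cons_prefix_cons.mp hpre
      have hy : y ∈ w := List.drop_subset j w (hdj ▸ List.mem_cons_self ..)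
      have := hw y hy
      subst hxy
      simp [List.getD] at hh
      simp_all

theorem pv_no_prefix_ws_append (d a m : List Char) (hd : d ≠ [])
    (hh : PySem.Chars.isspace (d.getD 0 'x') = false)
    (ha : ∀ c ∈ a, PySem.Chars.isspace c = true) (j : Nat) (hj : j < a.length) :
    ¬ d <+: List.drop j (a ++ m) := by
  intro hpre
  rw [List.drop_append] at hpre
  cases d with
  | nil => exact hd rfl
  | cons xc dtl =>
    cases hdj : List.drop j a with
    | nil =>
      have : a.length - j = 0 := by simpa using congrArg List.length hdj
      omega
    | cons y ys =>
      rw [hdj] at hpre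
      rw [List.cons_append] at hpre
      obtain ⟨hxy, -⟩ := List.cons_prefix_cons.mp hpre
      have hy : y ∈ a := List.drop_subset j a (hdj ▸ List.mem_cons_self ..)
      have := ha y hy
      subst hxy
      simp [List.getD] at hh
      simp_all

-- ---------- split across protected regions ----------
theorem pvSplit_append_noocc (d a u : List Char)
    (h : ∀ j, j < a.length → ¬ d <+: List.drop j (a ++ u)) :
    pvSplit d (a ++ u) = pvConsApp a (pvSplit d u) := by
  induction a with
  | nil => rw [List.nil_append, pvConsApp_nil_of_ne _ (pvSplit_ne_nil d u)]
  | cons x a' ih =>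
    have h0 : ¬ d.isPrefixOf (x :: (a' ++ u)) := by
      rw [List.isPrefixOf_iff_prefix]
      simpa using h 0 (by simp)
    rw [List.cons_append, pvSplit_cons_neg _ _ _ h0,
      ih (fun j hj => by simpa using h (j + 1) (by simp; omega)), pvConsHead_consApp]

theorem pvSplit_ws_suffix_aux (d : List Char) (hd : d ≠ []) (n : Nat) :
    ∀ core b : List Char, core.length ≤ n →
    (∀ j, ¬ d <+: List.drop j b) →
    (∀ j, j < core.length → d <+: List.drop j (core ++ b) → j + d.length ≤ core.length) →
    pvSplit d (core ++ b) = pvMapLast b (pvSplit d core) := by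
  have hdl : 1 ≤ d.length := by cases d with
    | nil => exact absurd rfl hd
    | cons _ _ => simp
  induction n with
  | zero =>
    intro core b hn hb hs
    have : core = [] := by cases core <;> simp_all
    subst this
    rw [List.nil_append, pvSplit_of_no_occ d b hb, pvSplit_nil]
    simp [pvMapLast]
  | succ n ih =>
    intro core b hn hb hs
    cases core with
    | nil =>
      rw [List.nil_append, pvSplit_of_no_occ d b hb, pvSplit_nil]
      simp [pvMapLast]
    | cons c core' =>
      by_cases hp : d.isPrefixOf ((c :: core') ++ b)
      · have hpre := List.isPrefixOf_iff_prefix.mp hp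
        have hlen : d.length ≤ (c :: core').length := by
          have := hs 0 (by simp) (by simpa using hpre)
          omega
        have hdcore : d <+: (c :: core') := (List.isPrefix_append_of_length hlen).mp hpre
        have hp2 : d.isPrefixOf (c :: core') := List.isPrefixOf_iff_prefix.mpr hdcore
        rw [List.cons_append, pvSplit_cons_pos _ _ _ (by rw [← List.cons_append]; exact hp),
          pvSplit_cons_pos _ _ _ hp2]
        have harr : List.drop (d.length - 1) (core' ++ b)
            = List.drop (d.length - 1) core' ++ b := by
          rw [List.drop_append]
          have : d.length - 1 - core'.length = 0 := by simp at hlen; omega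
          rw [this, List.drop_zero]
        rw [harr]
        rw [ih (List.drop (d.length - 1) core') b (by simp at hn ⊢; omega) hb ?_,
          pvMapLast_cons_of_ne _ _ _ (pvSplit_ne_nil _ _)]
        intro j hj hpj
        have hdropeq : List.drop j (List.drop (d.length - 1) core' ++ b)
            = List.drop (j + d.length) ((c :: core') ++ b) := by
          rw [← harr, List.drop_drop, List.cons_append]
          have h1 : j + d.length = (d.length - 1 + j) + 1 := by omega
          rw [h1, List.drop_succ_cons]
        rw [hdropeq] at hpj
        have := hs (j + d.length) (by simp at hj ⊢; omega) hpj
        simp at hj ⊢ this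
        omega
      · have hp2 : ¬ d.isPrefixOf (c :: core') := by
          intro hq
          exact hp (List.isPrefixOf_iff_prefix.mpr
            ((List.isPrefixOf_iff_prefix.mp hq).trans (List.prefix_append _ _)))
        rw [List.cons_append, pvSplit_cons_neg _ _ _ (by rw [← List.cons_append]; exact hp),
          pvSplit_cons_neg _ _ _ hp2]
        rw [ih core' b (by simp at hn; omega) hb ?_]
        · exact pvConsHead_mapLast c b _ (pvSplit_ne_nil _ _)
        · intro j hj hpj
          have heq : List.drop j (core' ++ b) = List.drop (j + 1) ((c :: core') ++ b) := rfl
          rw [heq] at hpj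
          have := hs (j + 1) (by simp at hj ⊢; omega) hpj
          simp at hj ⊢ this
          omega

theorem pvSplit_ws_suffix (d : List Char) (hd : d ≠ []) (core b : List Char)
    (hb : ∀ j, ¬ d <+: List.drop j b)
    (hs : ∀ j, j < core.length → d <+: List.drop j (core ++ b) → j + d.length ≤ core.length) :
    pvSplit d (core ++ b) = pvMapLast b (pvSplit d core) :=
  pvSplit_ws_suffix_aux d hd core.length core b (le_refl _) hb hs

-- straddling occurrences are impossible when d ends in a non-space char and b is all space
theorem pv_ws_suffix_hs (d core b : List Char) (hd : d ≠ [])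
    (hl : PySem.Chars.isspace (d.getD (d.length - 1) 'x') = false)
    (hb : ∀ c ∈ b, PySem.Chars.isspace c = true) :
    ∀ j, j < core.length → d <+: List.drop j (core ++ b) → j + d.length ≤ core.length := by
  intro j hj hpre
  by_contra hgt
  rw [Nat.not_le] at hgt
  have hdl : 1 ≤ d.length := by cases d with
    | nil => exact absurd rfl hd
    | cons _ _ => simp
  have hlenp := hpre.length_le
  rw [List.length_drop, List.length_append] at hlenp
  have hkk : j + (d.length - 1) < core.length + b.length := by omega
  obtain ⟨r, hr⟩ := hpre
  have e1 : (core ++ b)[j + (d.length - 1)]'(by rw [List.length_append]; omega)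
      = d[d.length - 1]'(by omega) := by
    have h1 : (List.drop j (core ++ b))[d.length - 1]'(by rw [List.length_drop, List.length_append]; omega)
        = (core ++ b)[j + (d.length - 1)]'(by rw [List.length_append]; omega) := by
      rw [List.getElem_drop]
    rw [← h1]
    have h2 : (List.drop j (core ++ b))[d.length - 1]'(by rw [List.length_drop, List.length_append]; omega)
        = (d ++ r)[d.length - 1]'(by simp; omega) := by
      congr 1
      exact hr.symm
    rw [h2]
    exact List.getElem_append_left (by omega)
  have e2 : PySem.Chars.isspace ((core ++ b)[j + (d.length - 1)]'(by rw [List.length_append]; omega)) = true := by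
    rw [List.getElem_append_right (by omega)]
    exact hb _ (List.getElem_mem _)
  rw [List.getD_eq_getElem d 'x' (by omega)] at hl
  rw [e1] at e2
  rw [hl] at e2
  exact Bool.false_ne_true e2

-- ---------- strip-and-filter pipeline ----------
def pvSF (ps : List (List Char)) : List (List Char) :=
  (ps.map PySem.Chars.strip).filter (fun q => q ≠ [])

theorem pvSF_nil : pvSF [] = [] := rfl

theorem pvSF_cons (p : List Char) (t : List (List Char)) :
    pvSF (p :: t) = if PySem.Chars.strip p = [] then pvSF t
      else PySem.Chars.strip p :: pvSF t := by
  simp [pvSF]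
  split <;> simp_all

theorem pvSF_append (x y : List (List Char)) : pvSF (x ++ y) = pvSF x ++ pvSF y := by
  simp [pvSF]

theorem pvSF_consApp_ws (a : List Char) (ha : ∀ c ∈ a, PySem.Chars.isspace c = true)
    (ps : List (List Char)) (hne : ps ≠ []) : pvSF (pvConsApp a ps) = pvSF ps := by
  cases ps with
  | nil => exact absurd rfl hne
  | cons p t =>
    show pvSF ((a ++ p) :: t) = pvSF (p :: t)
    rw [pvSF_cons, pvSF_cons, pv_strip_ws_append_left a p ha]

theorem pvSF_mapLast_ws (b : List Char) (hb : ∀ c ∈ b, PySem.Chars.isspace c = true)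
    (ps : List (List Char)) : pvSF (pvMapLast b ps) = pvSF ps := by
  induction ps with
  | nil => rfl
  | cons p t ih =>
    cases t with
    | nil =>
      show pvSF [p ++ b] = pvSF [p]
      rw [pvSF_cons, pvSF_cons, pv_strip_ws_append_right p b hb]
    | cons q u =>
      rw [pvMapLast_cons_of_ne _ _ _ (by simp), pvSF_cons, pvSF_cons, ih]

-- splitting the stripped clause gives the same stripped non-empty pieces
theorem pvSF_split_strip (d : List Char) (hd : d ≠ [])
    (hh : PySem.Chars.isspace (d.getD 0 'x') = false)
    (hl : PySem.Chars.isspace (d.getD (d.length - 1) 'x') = false) (p : List Char) :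
    pvSF (pvSplit d (PySem.Chars.strip p)) = pvSF (pvSplit d p) := by
  obtain ⟨a, b, hp, ha, hb⟩ := pv_strip_decomp p
  conv_rhs => rw [hp, List.append_assoc]
  rw [pvSplit_append_noocc d a (PySem.Chars.strip p ++ b)
      (fun j hj => pv_no_prefix_ws_append d a _ hd hh ha j hj),
    pvSF_consApp_ws a ha _ (pvSplit_ne_nil _ _),
    pvSplit_ws_suffix d hd _ b (pv_no_prefix_ws d b hd hh hb)
      (pv_ws_suffix_hs d _ b hd hl hb),
    pvSF_mapLast_ws b hb]

-- strip/filter between rounds does not change the final stripped pieces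
theorem pvSF_flat_split (d : List Char) (hd : d ≠ [])
    (hh : PySem.Chars.isspace (d.getD 0 'x') = false)
    (hl : PySem.Chars.isspace (d.getD (d.length - 1) 'x') = false) (ps : List (List Char)) :
    pvSF ((pvSF ps).flatMap (pvSplit d)) = pvSF (ps.flatMap (pvSplit d)) := by
  induction ps with
  | nil => rfl
  | cons p t ih =>
    rw [List.flatMap_cons, pvSF_cons]
    by_cases hsp : PySem.Chars.strip p = []
    · rw [if_pos hsp, pvSF_append, ih,
        pvSplit_of_no_occ d p (pv_no_prefix_ws d p hd hh ((pv_strip_eq_nil_iff p).mp hsp))]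
      have : pvSF [p] = [] := by rw [pvSF_cons, if_pos hsp, pvSF_nil]
      rw [this, List.nil_append]
    · rw [if_neg hsp, List.flatMap_cons, pvSF_append, pvSF_append, ih,
        pvSF_split_strip d hd hh hl p]

-- ---------- scanner equations ----------
theorem pvScanG_nil (L : List (List Char)) : pvScanG L [] = [[]] := by
  rw [pvScanG.eq_def]

theorem pvScanG_cons_pos (L : List (List Char)) (c : Char) (rest : List Char) (d : List Char)
    (h : L.find? (fun e => e.isPrefixOf (c :: rest)) = some d) :
    pvScanG L (c :: rest) = [] :: pvScanG L (List.drop (d.length - 1) rest) := by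
  conv_lhs => rw [pvScanG.eq_def]
  simp [h]

theorem pvScanG_cons_neg (L : List (List Char)) (c : Char) (rest : List Char)
    (h : L.find? (fun e => e.isPrefixOf (c :: rest)) = none) :
    pvScanG L (c :: rest) = pvConsHead c (pvScanG L rest) := by
  conv_lhs => rw [pvScanG.eq_def]
  simp only [h]
  cases hq : pvScanG L rest <;> simp [pvConsHead]

theorem pvScanG_ne_nil (L : List (List Char)) (t : List Char) : pvScanG L t ≠ [] := by
  cases t with
  | nil => rw [pvScanG_nil]; simp
  | cons c rest =>
    cases hf : L.find? (fun e => e.isPrefixOf (c :: rest)) with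
    | some d => rw [pvScanG_cons_pos _ _ _ _ hf]; simp
    | none => rw [pvScanG_cons_neg _ _ _ hf]; exact pvConsHead_ne_nil _ _

theorem pvConsHead_append (c : Char) (ps qs : List (List Char)) (h : ps ≠ []) :
    pvConsHead c (ps ++ qs) = pvConsHead c ps ++ qs := by
  cases ps with
  | nil => exact absurd rfl h
  | cons p t => simp [pvConsHead]

theorem pv_find?_eq_some_of_unique {α : Type} (p : α → Bool) (L : List α) (d : α)
    (hm : d ∈ L) (hp : p d = true) (hu : ∀ e ∈ L, p e = true → e = d) :
    L.find? p = some d := by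
  induction L with
  | nil => cases hm
  | cons e t ih =>
    by_cases hpe : p e = true
    · rw [List.find?_cons_of_pos hpe, hu e List.mem_cons_self hpe]
    · rw [List.find?_cons_of_neg (by simpa using hpe)]
      rcases List.mem_cons.mp hm with h | h
      · subst h; exact absurd hp hpe
      · exact ih h (fun x hx => hu x (List.mem_cons_of_mem _ hx))

-- ---------- the delimiter-set side conditions ----------
def pvGood (L : List (List Char)) : Prop :=
  (∀ e ∈ L, e ≠ []) ∧
  (∀ e₁ ∈ L, ∀ e₂ ∈ L, e₁ <+: e₂ → e₁ = e₂) ∧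
  (∀ e₁ ∈ L, ∀ e₂ ∈ L, ∀ j < e₁.length, 0 < j → (e₁.drop j).head? ≠ e₂.head?)

theorem pvGood_tail (d : List Char) (ds : List (List Char)) (hg : pvGood (d :: ds)) :
    pvGood ds :=
  ⟨fun e he => hg.1 e (List.mem_cons_of_mem _ he),
   fun e₁ h1 e₂ h2 => hg.2.1 e₁ (List.mem_cons_of_mem _ h1) e₂ (List.mem_cons_of_mem _ h2),
   fun e₁ h1 e₂ h2 => hg.2.2 e₁ (List.mem_cons_of_mem _ h1) e₂ (List.mem_cons_of_mem _ h2)⟩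

-- two delimiter occurrences cannot overlap
theorem pv_overlap (L : List (List Char)) (hg : pvGood L) (e₁ e₂ : List Char)
    (h1 : e₁ ∈ L) (h2 : e₂ ∈ L) (t : List Char) (hp1 : e₁ <+: t)
    (j : Nat) (h0 : 0 < j) (hj : j < e₁.length) : ¬ e₂ <+: List.drop j t := by
  intro hp2
  obtain ⟨r, hr⟩ := hp1
  rw [← hr, List.drop_append, (by omega : j - e₁.length = 0), List.drop_zero] at hp2
  cases he2 : e₂ with
  | nil => exact hg.1 e₂ h2 he2
  | cons x e' =>
    cases hdj : e₁.drop j with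
    | nil =>
      have : e₁.length - j = 0 := by simpa using congrArg List.length hdj
      omega
    | cons y ys =>
      rw [he2, hdj, List.cons_append] at hp2
      obtain ⟨hxy, -⟩ := List.cons_prefix_cons.mp hp2
      exact hg.2.2 e₁ h1 e₂ h2 j hj h0 (by rw [hdj, he2, hxy]; rfl)

-- at a single position at most one delimiter matches
theorem pv_uniq_at (L : List (List Char)) (hg : pvGood L) (e₁ e₂ : List Char)
    (h1 : e₁ ∈ L) (h2 : e₂ ∈ L) (t : List Char) (hp1 : e₁ <+: t) (hp2 : e₂ <+: t) :
    e₁ = e₂ := by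
  rcases List.prefix_or_prefix_of_prefix hp1 hp2 with h | h
  · exact hg.2.1 e₁ h1 e₂ h2 h
  · exact (hg.2.1 e₂ h2 e₁ h1 h).symm

-- THE step lemma: scanning with d :: ds = split by d, then scan the pieces with ds
theorem pv_scan_step (d : List Char) (ds : List (List Char)) (hg : pvGood (d :: ds)) :
    ∀ t : List Char, pvScanG (d :: ds) t = (pvSplit d t).flatMap (pvScanG ds) := by
  intro t
  cases t with
  | nil =>
    rw [pvScanG_nil, pvSplit_nil]
    simp [pvScanG_nil]
  | cons c rest =>
    cases hf : (d :: ds).find? (fun e => e.isPrefixOf (c :: rest)) with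
    | none =>
      have hall := List.find?_eq_none.mp hf
      have hnd : ¬ d.isPrefixOf (c :: rest) = true := by
        simpa using hall d List.mem_cons_self
      rw [pvScanG_cons_neg _ _ _ hf, pvSplit_cons_neg _ _ _ hnd]
      cases hps : pvSplit d rest with
      | nil => exact absurd hps (pvSplit_ne_nil _ _)
      | cons p ps =>
        have hppre : p <+: rest := pvSplit_head_prefix d rest p ps hps
        have hf2 : ds.find? (fun e => e.isPrefixOf (c :: p)) = none := by
          apply List.find?_eq_none.mpr
          intro e he hpe
          have : e.isPrefixOf (c :: rest) = true := by
            rw [List.isPrefixOf_iff_prefix] at hpe ⊢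
            exact hpe.trans (List.cons_prefix_cons.mpr ⟨rfl, hppre⟩)
          have := hall e (List.mem_cons_of_mem _ he)
          simp_all
        show pvConsHead c (pvScanG (d :: ds) rest) = (pvConsHead c (p :: ps)).flatMap (pvScanG ds)
        rw [show pvConsHead c (p :: ps) = (c :: p) :: ps from rfl, List.flatMap_cons,
          pvScanG_cons_neg _ _ _ hf2, pv_scan_step d ds hg rest, hps, List.flatMap_cons,
          pvConsHead_append c _ _ (pvScanG_ne_nil _ _)]
    | some d0 =>
      have hd0mem := List.mem_of_find?_eq_some hf
      have hd0p : d0.isPrefixOf (c :: rest) = true := by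
        have := List.find?_some hf
        simpa using this
      have hd0ne : d0 ≠ [] := hg.1 d0 hd0mem
      rw [pvScanG_cons_pos _ _ _ _ hf]
      by_cases hdd : d0 = d
      · subst hdd
        rw [pvSplit_cons_pos _ _ _ hd0p, List.flatMap_cons, pvScanG_nil,
          pv_scan_step d0 ds hg (List.drop (d0.length - 1) rest)]
        rfl
      · have hd0ds : d0 ∈ ds := by
          rcases List.mem_cons.mp hd0mem with h | h
          · exact absurd h hdd
          · exact h
        have hnd : ¬ d.isPrefixOf (c :: rest) = true := by
          intro hq
          have hfd : (d :: ds).find? (fun e => e.isPrefixOf (c :: rest)) = some d :=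
            List.find?_cons_of_pos hq
          rw [hfd] at hf
          exact hdd (Option.some.inj hf).symm
        have ht : (c :: rest) = d0 ++ List.drop (d0.length - 1) rest := by
          obtain ⟨r, hr⟩ := List.isPrefixOf_iff_prefix.mp hd0p
          rw [drop_pred_eq d0 hd0ne c rest, ← hr, List.drop_left]
        have hsplit : pvSplit d (c :: rest) = pvConsApp d0 (pvSplit d (List.drop (d0.length - 1) rest)) := by
          conv_lhs => rw [ht]
          apply pvSplit_append_noocc
          intro j hj
          rcases Nat.eq_zero_or_pos j with hj0 | hj0
          · subst hj0
            rw [List.drop_zero, ← ht]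
            rw [List.isPrefixOf_iff_prefix] at hnd
            exact hnd
          · rw [← ht]
            exact pv_overlap (d :: ds) hg d0 d hd0mem List.mem_cons_self (c :: rest)
              (List.isPrefixOf_iff_prefix.mp hd0p) j hj0 hj
        rw [hsplit]
        cases hps : pvSplit d (List.drop (d0.length - 1) rest) with
        | nil => exact absurd hps (pvSplit_ne_nil _ _)
        | cons p ps =>
          have hfind2 : ds.find? (fun e => e.isPrefixOf (d0 ++ p)) = some d0 := by
            apply pv_find?_eq_some_of_unique
            · exact hd0ds
            · rw [List.isPrefixOf_iff_prefix]
              exact List.prefix_append _ _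
            · intro e he hpe
              exact pv_uniq_at (d :: ds) hg e d0 (List.mem_cons_of_mem _ he)
                (List.mem_cons_of_mem _ hd0ds) (d0 ++ p)
                (List.isPrefixOf_iff_prefix.mp hpe) (List.prefix_append _ _)
          obtain ⟨x0, d0tl, rfl⟩ : ∃ x t0, d0 = x :: t0 := by
            cases d0 with
            | nil => exact absurd rfl hd0ne
            | cons a b => exact ⟨a, b, rfl⟩
          show [] :: pvScanG (d :: ds) (List.drop ((x0 :: d0tl).length - 1) rest)
              = ((x0 :: (d0tl ++ p)) :: ps).flatMap (pvScanG ds)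
          simp only [List.length_cons, Nat.add_sub_cancel] at hps
          rw [List.flatMap_cons,
            pvScanG_cons_pos ds x0 (d0tl ++ p) (x0 :: d0tl) hfind2,
            show (x0 :: d0tl).length - 1 = d0tl.length from by simp,
            List.drop_left,
            pv_scan_step d ds hg (List.drop d0tl.length rest), hps, List.flatMap_cons]
          rfl
termination_by t => t.length
decreasing_by
  all_goals simp only [List.length_drop, List.length_cons]; omega

def pvSeq : List (List Char) → List Char → List (List Char)
  | [], t => [t]
  | d :: ds, t => (pvSplit d t).flatMap (pvSeq ds)

theorem pvScanG_no_delims (t : List Char) : pvScanG [] t = [t] := by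
  induction t with
  | nil => rw [pvScanG_nil]
  | cons c rest ih =>
    rw [pvScanG_cons_neg [] c rest (by rw [List.find?_nil]), ih]
    rfl

theorem pv_scan_eq_seq (L : List (List Char)) (hg : pvGood L) (t : List Char) :
    pvScanG L t = pvSeq L t := by
  induction L generalizing t with
  | nil => rw [pvScanG_no_delims]; rfl
  | cons d ds ih =>
    rw [pv_scan_step d ds hg t]
    show _ = (pvSplit d t).flatMap (pvSeq ds)
    rw [show pvScanG ds = pvSeq ds from funext (fun u => ih (pvGood_tail d ds hg) u)]

-- ---------- the A-side fold ----------
theorem pvSF_flatMap (xs : List (List Char)) (f : List Char → List (List Char)) :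
    pvSF (xs.flatMap f) = xs.flatMap (fun x => pvSF (f x)) := by
  simp [pvSF, List.map_flatMap, List.filter_flatMap]

def pvSolidCond (d : List Char) : Prop :=
  d ≠ [] ∧ PySem.Chars.isspace (d.getD 0 'x') = false
    ∧ PySem.Chars.isspace (d.getD (d.length - 1) 'x') = false

theorem pv_fold_inv (L : List (List Char)) (hs : ∀ e ∈ L, pvSolidCond e) (ps : List (List Char)) :
    L.foldl
      (fun cls delim => cls.foldl
        (fun acc clause => acc ++
          ((PySem.Chars.splitOn clause delim).map PySem.Chars.strip).filter (fun p => p ≠ []))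
        [])
      (pvSF ps)
    = pvSF (ps.flatMap (pvSeq L)) := by
  induction L generalizing ps with
  | nil =>
    rw [List.foldl_nil]
    show pvSF ps = pvSF (ps.flatMap (fun t => [t]))
    rw [List.flatMap_singleton' ps]
  | cons d ds ih =>
    obtain ⟨hd, hh, hl⟩ := hs d List.mem_cons_self
    rw [List.foldl_cons, PySem.List.foldl_append_eq_flatMap, List.nil_append]
    have h1 : (fun clause => ((PySem.Chars.splitOn clause d).map PySem.Chars.strip).filter (fun p => p ≠ []))
        = fun clause => pvSF (pvSplit d clause) := by
      funext clause
      rw [show ((PySem.Chars.splitOn clause d).map PySem.Chars.strip).filter (fun p => p ≠ [])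
          = pvSF (PySem.Chars.splitOn clause d) from rfl, splitOn_eq_pvSplit d hd clause]
    rw [h1, ← pvSF_flatMap, pvSF_flat_split d hd hh hl ps,
      ih (fun e he => hs e (List.mem_cons_of_mem _ he)) (ps.flatMap (pvSplit d)),
      List.flatMap_assoc]
    rfl

theorem pv_good_delims : pvGood pvDelims := by
  unfold pvGood pvDelims
  refine ⟨by decide, by decide, by decide⟩

theorem pv_solid_delims : ∀ e ∈ pvDelims, pvSolidCond e := by
  unfold pvSolidCond pvDelims
  decide

theorem pv_full (L : List (List Char)) (hg : pvGood L) (hs : ∀ e ∈ L, pvSolidCond e)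
    (hne : L ≠ []) (t : List Char) :
    L.foldl
      (fun cls delim => cls.foldl
        (fun acc clause => acc ++
          ((PySem.Chars.splitOn clause delim).map PySem.Chars.strip).filter (fun p => p ≠ []))
        [])
      [t]
    = ((pvScanG L t).map PySem.Chars.strip).filter (fun p => p ≠ []) := by
  cases L with
  | nil => exact absurd rfl hne
  | cons d ds =>
    obtain ⟨hd, -, -⟩ := hs d List.mem_cons_self
    rw [List.foldl_cons]
    rw [show List.foldl
        (fun acc clause => acc ++
          ((PySem.Chars.splitOn clause d).map PySem.Chars.strip).filter (fun p => p ≠ []))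
        [] [t]
      = pvSF (pvSplit d t) from by
        rw [List.foldl_cons, List.foldl_nil, List.nil_append, splitOn_eq_pvSplit d hd t]; rfl]
    rw [pv_fold_inv ds (fun e he => hs e (List.mem_cons_of_mem _ he)) (pvSplit d t)]
    rw [show (pvSplit d t).flatMap (pvSeq ds) = pvSeq (d :: ds) t from rfl,
      ← pv_scan_eq_seq (d :: ds) hg t]
    rfl

-- ===== VERDICT (by name: the statement is the Claim_ definition above) =====
theorem segment_clauses_py_spec : Claim_equal_segment_clauses_py := by
  intro text _
  unfold Spec_segment_clauses_py segment_clauses_py segment_clauses_py_alt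
  have h := pv_full pvDelims pv_good_delims pv_solid_delims (by unfold pvDelims; simp) text.toList
  simp only [show ([['.'], ['!'], ['?'], [';'],
      [',', ' ', 'a', 'n', 'd'], [',', ' ', 'b', 'u', 't'], [',', ' ', 's', 'o']] : List (List Char))
      = pvDelims from rfl, h]
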